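-- pv_equiv track=rewrite | github.com/wnsmir/Algorithm | 코드트리/250410/미지의 공간 탈출/escape-unknown-space.py | build_extended_grid
-- ===== SOURCE A (Python) =====
-- def rotate_matrix(matrix, angle):
--     """행렬을 시계 방향으로 angle(°) 만큼 회전"""
--     if angle == 90:
--         return [list(row) for row in zip(*matrix[::-1])]
--     elif angle == 180:
--         return [row[::-1] for row in matrix[::-1]]
--     elif angle == 270:
--         return [list(row) for row in zip(*matrix)][::-1]
--     else:
--         return matrix
--
-- def build_extended_grid(time_top):
--     """
--     time_top: M×M 행렬 (남쪽 데이터)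
--
--     남쪽 블록: 원본 time_top
--     동쪽 블록: time_top을 270° 회전
--     북쪽 블록: time_top을 180° 회전
--     서쪽 블록: time_top을 90° 회전
--
--     이 네 개의 블록을 남, 동, 북, 서 순서로 이어붙이고,
--     그 순서를 다시 반복하여 가로로 8개의 M×M 블록을 만들고,
--     이를 두 번 쌓아 2*M × 8*M 크기의 확장 grid를 구성합니다.
--     """
--     M = len(time_top)
--     block_south = time_top
--     block_east  = rotate_matrix(time_top, 270)
--     block_north = rotate_matrix(time_top, 180)
--     block_west  = rotate_matrix(time_top, 90)
--
--     row_blocks = []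
--     for i in range(M):
--         row = (block_south[i] + block_east[i] +
--                block_north[i] + block_west[i] +
--                block_south[i] + block_east[i] +
--                block_north[i] + block_west[i])
--         row_blocks.append(row)
--     extended_grid = row_blocks + row_blocks
--     return extended_grid
-- ===== SOURCE B (Python) =====
-- def build_extended_grid(time_top):
--     # Pure gather over output coordinates: each of the 2M x 8M cells is read
--     # directly from the source via a divmod block dispatch; no rotated copy,
--     # no concatenation and no row duplication are ever materialized.
--     M = len(time_top)
--
--     def cell(r, c):
--         i, j, blk = r % M, c % M, (c // M) % 4
--         if blk == 0:
--             return time_top[i][j]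
--         if blk == 1:
--             return time_top[j][M - 1 - i]
--         if blk == 2:
--             return time_top[M - 1 - i][M - 1 - j]
--         return time_top[M - 1 - j][i]
--
--     return [[cell(r, c) for c in range(8 * M)] for r in range(2 * M)]
-- ===== Notes on version B (the rewrite author's own statement) =====
-- stated objective: alternative
-- what changed: B never builds rotated copies, concatenates blocks or duplicates rows: it is a single gather over all 2M x 8M output coordinates, where each cell is fetched straight from the source matrix by a divmod block dispatch (blk = (c//M)%4 picks one of four closed-form rotation index maps, and r%M / repetition of blk gives the periodic tiling for free).
import Mathlib
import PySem

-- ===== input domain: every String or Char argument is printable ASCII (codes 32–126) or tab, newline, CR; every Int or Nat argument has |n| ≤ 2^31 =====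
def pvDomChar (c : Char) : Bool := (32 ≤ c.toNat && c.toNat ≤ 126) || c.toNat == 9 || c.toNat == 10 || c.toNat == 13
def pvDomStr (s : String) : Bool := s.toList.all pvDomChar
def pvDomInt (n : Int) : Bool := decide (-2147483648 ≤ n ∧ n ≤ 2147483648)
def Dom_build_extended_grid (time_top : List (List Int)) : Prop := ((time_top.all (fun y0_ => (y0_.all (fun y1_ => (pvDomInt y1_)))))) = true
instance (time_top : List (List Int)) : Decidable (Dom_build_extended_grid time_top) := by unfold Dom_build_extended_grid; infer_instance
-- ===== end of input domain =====

-- Port of build_extended_grid (extended 2M×8M grid from rotated blocks) and a re-implementation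
-- that gathers every output cell directly by a divmod block dispatch; proved equal on square matrices.


-- ===== PORT A =====
-- Hand port of Python's zip(*m): number of rows = min row length (0 for m = []),
-- row k = the k-th element of every row of m; exact on every input (each index k is
-- below every row length, so the getD default is never used).
def pyZipStar (m : List (List Int)) : List (List Int) :=
  match m with
  | [] => []
  | r0 :: _ =>
    let L := m.foldl (fun acc r => min acc r.length) r0.length
    (List.range L).map (fun k => m.map (fun r => r.getD k 0))

def rotate_matrix (matrix : List (List Int)) (angle : Int) : List (List Int) :=
  if angle = 90 then pyZipStar matrix.reverse
  else if angle = 180 then (matrix.reverse).map List.reverse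
  else if angle = 270 then (pyZipStar matrix).reverse
  else matrix

-- block[i] indexing is in range on every input admitted by Pre_ (square matrix), so getD's
-- default is never used there.
def build_extended_grid (time_top : List (List Int)) : List (List Int) :=
  let M := time_top.length
  let bs := time_top
  let be := rotate_matrix time_top 270
  let bn := rotate_matrix time_top 180
  let bw := rotate_matrix time_top 90
  let row_blocks := (List.range M).map (fun i =>
    bs.getD i [] ++ be.getD i [] ++ bn.getD i [] ++ bw.getD i [] ++
    bs.getD i [] ++ be.getD i [] ++ bn.getD i [] ++ bw.getD i [])
  row_blocks ++ row_blocks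

-- ===== PORT B =====
-- Source B's cell(r, c): one source lookup per output coordinate, chosen by blk = (c/M) % 4.
def begCell (tt : List (List Int)) (M : Nat) (r c : Nat) : Int :=
  let i := r % M
  let j := c % M
  let blk := (c / M) % 4
  if blk = 0 then (tt.getD i []).getD j 0
  else if blk = 1 then (tt.getD j []).getD (M - 1 - i) 0
  else if blk = 2 then (tt.getD (M - 1 - i) []).getD (M - 1 - j) 0
  else (tt.getD (M - 1 - j) []).getD i 0

def build_extended_grid_alt (time_top : List (List Int)) : List (List Int) :=
  let M := time_top.length
  (List.range (2 * M)).map (fun r => (List.range (8 * M)).map (fun c => begCell time_top M r c))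

-- ===== PRECONDITION & SPEC =====
-- Pre_ admits exactly the square (M×M) matrices the function is documented for: on a ragged
-- input A raises IndexError when some row is shorter than M, and when rows are longer than M
-- the returned shape is an accident of zip's truncation, which B does not reproduce.
def Pre_build_extended_grid (time_top : List (List Int)) : Prop :=
  ∀ row ∈ time_top, row.length = time_top.length
instance (time_top : List (List Int)) : Decidable (Pre_build_extended_grid time_top) := by
  unfold Pre_build_extended_grid; infer_instance

def pvWitness_build_extended_grid : List (List Int) := [[1, 2], [3, 4]]

def Spec_build_extended_grid (time_top : List (List Int)) (out : List (List Int)) : Prop := out = build_extended_grid_alt time_top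
instance (time_top : List (List Int)) (out : List (List Int)) : Decidable (Spec_build_extended_grid time_top out) := by unfold Spec_build_extended_grid; infer_instance

-- ===== CLAIM (what is proved, stated in full; the proofs are below) =====
def Claim_equal_build_extended_grid : Prop := ∀ (time_top : List (List Int)), Dom_build_extended_grid time_top → Pre_build_extended_grid time_top → Spec_build_extended_grid time_top (build_extended_grid time_top)

-- ===== LEMMAS AND PROOFS =====

-- A list of length M is the range-map of its own entries.
theorem list_eq_map_range (l : List Int) (M : Nat) (h : l.length = M) :
    l = (List.range M).map (fun j => l.getD j 0) := by
  apply List.ext_getElem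
  · simp [h]
  · intro i h1 h2
    simp [List.getD_eq_getElem?_getD, List.getElem?_eq_getElem h1, h.symm]

theorem foldl_min_len (M : Nat) (rows : List (List Int))
    (h : ∀ r ∈ rows, r.length = M) :
    rows.foldl (fun acc r => min acc r.length) M = M := by
  induction rows with
  | nil => rfl
  | cons r rs ih =>
    have hr := h r (by simp)
    simp only [List.foldl_cons, hr, min_self]
    exact ih (fun r hm => h r (by simp [hm]))

theorem pyZipStar_square (m : List (List Int)) (h : ∀ r ∈ m, r.length = m.length) :
    pyZipStar m = (List.range m.length).map (fun k => m.map (fun r => r.getD k 0)) := by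
  match m with
  | [] => simp [pyZipStar]
  | r0 :: rest =>
    have h0 : r0.length = (r0 :: rest).length := h r0 (by simp)
    simp only [pyZipStar, h0]
    rw [foldl_min_len _ _ h]

theorem getD_map_range {a : Type} (f : Nat → a) (M i : Nat) (d : a) (h : i < M) :
    ((List.range M).map f).getD i d = f i := by
  simp [List.getD_eq_getElem?_getD, h]

theorem getD_reverse {a : Type} (l : List a) (i : Nat) (d : a) (h : i < l.length) :
    l.reverse.getD i d = l.getD (l.length - 1 - i) d := by
  have h' : l.length - 1 - i < l.length := by omega
  rw [List.getD_eq_getElem?_getD, List.getD_eq_getElem?_getD,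
      List.getElem?_eq_getElem (by simpa using h), List.getElem?_eq_getElem h']
  simp [List.getElem_reverse]

theorem getD_map {a b : Type} (l : List a) (f : a → b) (i : Nat) (d : b) (d' : a)
    (h : i < l.length) :
    (l.map f).getD i d = f (l.getD i d') := by
  rw [List.getD_eq_getElem?_getD, List.getElem?_eq_getElem (by simpa using h),
      List.getD_eq_getElem?_getD, List.getElem?_eq_getElem h]
  simp

theorem map_eq_map_range {a b : Type} (l : List a) (f : a → b) (d : a) :
    l.map f = (List.range l.length).map (fun j => f (l.getD j d)) := by
  apply List.ext_getElem
  · simp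
  · intro i h1 h2
    simp at h1
    simp [List.getD_eq_getElem?_getD, List.getElem?_eq_getElem h1]

theorem reverse_eq_map_range (l : List Int) (M : Nat) (h : l.length = M) :
    l.reverse = (List.range M).map (fun j => l.getD (M - 1 - j) 0) := by
  apply List.ext_getElem
  · simp [h]
  · intro i h1 h2
    simp at h1
    have h3 : M - 1 - i < l.length := by omega
    simp [List.getElem_reverse, List.getD_eq_getElem?_getD, List.getElem?_eq_getElem h3, h]

-- A's row i (rotations already unfolded) as four explicit range-maps, repeated.
theorem row_eq (tt : List (List Int)) (hsq : ∀ r ∈ tt, r.length = tt.length)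
    (i : Nat) (hi : i < tt.length) :
    tt.getD i [] ++ (pyZipStar tt).reverse.getD i [] ++
      (tt.reverse.map List.reverse).getD i [] ++ (pyZipStar tt.reverse).getD i [] ++
      tt.getD i [] ++ (pyZipStar tt).reverse.getD i [] ++
      (tt.reverse.map List.reverse).getD i [] ++ (pyZipStar tt.reverse).getD i [] =
    ((List.range tt.length).map (fun j => (tt.getD i []).getD j 0) ++
     (List.range tt.length).map (fun j => (tt.getD j []).getD (tt.length - 1 - i) 0) ++
     (List.range tt.length).map (fun j => (tt.getD (tt.length - 1 - i) []).getD (tt.length - 1 - j) 0) ++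
     (List.range tt.length).map (fun j => (tt.getD (tt.length - 1 - j) []).getD i 0)) ++
    ((List.range tt.length).map (fun j => (tt.getD i []).getD j 0) ++
     (List.range tt.length).map (fun j => (tt.getD j []).getD (tt.length - 1 - i) 0) ++
     (List.range tt.length).map (fun j => (tt.getD (tt.length - 1 - i) []).getD (tt.length - 1 - j) 0) ++
     (List.range tt.length).map (fun j => (tt.getD (tt.length - 1 - j) []).getD i 0)) := by
  have hrow : ∀ k, k < tt.length → (tt.getD k []).length = tt.length := by
    intro k hk
    rw [List.getD_eq_getElem?_getD, List.getElem?_eq_getElem hk]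
    exact hsq _ (List.getElem_mem hk)
  have hS : tt.getD i [] = (List.range tt.length).map (fun j => (tt.getD i []).getD j 0) :=
    list_eq_map_range _ _ (hrow i hi)
  have hE : (pyZipStar tt).reverse.getD i [] =
      (List.range tt.length).map (fun j => (tt.getD j []).getD (tt.length - 1 - i) 0) := by
    rw [pyZipStar_square tt hsq, getD_reverse _ _ _ (by simp [hi])]
    simp only [List.length_map, List.length_range]
    rw [getD_map_range _ _ _ _ (by omega)]
    exact map_eq_map_range tt _ []
  have hN : (tt.reverse.map List.reverse).getD i [] =
      (List.range tt.length).map (fun j => (tt.getD (tt.length - 1 - i) []).getD (tt.length - 1 - j) 0) := by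
    rw [getD_map _ _ _ _ [] (by simp [hi]), getD_reverse _ _ _ (by simp [hi])]
    exact reverse_eq_map_range _ _ (hrow _ (by omega))
  have hW : (pyZipStar tt.reverse).getD i [] =
      (List.range tt.length).map (fun j => (tt.getD (tt.length - 1 - j) []).getD i 0) := by
    have hsqr : ∀ r ∈ tt.reverse, r.length = tt.reverse.length := by
      simp only [List.mem_reverse, List.length_reverse]; exact hsq
    rw [pyZipStar_square tt.reverse hsqr]
    simp only [List.length_reverse]
    rw [getD_map_range _ _ _ _ hi, map_eq_map_range tt.reverse (fun r => r.getD i 0) []]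
    simp only [List.length_reverse]
    apply List.map_congr_left
    intro j hj
    simp only [List.mem_range] at hj
    rw [getD_reverse _ _ _ (by omega)]
  conv_lhs => rw [hS, hE, hN, hW]
  simp [List.append_assoc]

theorem map_range_add {a : Type} (f : Nat → a) (m n : Nat) :
    (List.range (m + n)).map f = (List.range m).map f ++ (List.range n).map (fun j => f (m + j)) := by
  rw [List.range_add, List.map_append, List.map_map]
  simp [Function.comp]

theorem map_range_mul (f : Nat → Int) (K M : Nat) :
    (List.range (K * M)).map f =
    (List.range K).flatMap (fun k => (List.range M).map (fun j => f (k * M + j))) := by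
  induction K with
  | zero => simp
  | succ K ih =>
    have h : (K + 1) * M = K * M + M := by ring
    rw [h, map_range_add, ih, List.range_succ, List.flatMap_append]
    simp

-- One block of B's column loop: for j < M and offset k*M the divmod dispatch resolves to block k % 4.
theorem begCell_block (tt : List (List Int)) (M i k j : Nat) (hi : i < M) (hj : j < M) :
    begCell tt M i (k * M + j) =
      (if k % 4 = 0 then (tt.getD i []).getD j 0
       else if k % 4 = 1 then (tt.getD j []).getD (M - 1 - i) 0
       else if k % 4 = 2 then (tt.getD (M - 1 - i) []).getD (M - 1 - j) 0
       else (tt.getD (M - 1 - j) []).getD i 0) := by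
  have hM : 0 < M := by omega
  have h1 : (k * M + j) / M = k := by
    rw [Nat.mul_comm, Nat.mul_add_div hM, Nat.div_eq_of_lt hj]
    omega
  have h2 : (k * M + j) % M = j := by
    rw [Nat.mul_comm k M, Nat.mul_add_mod, Nat.mod_eq_of_lt hj]
  simp only [begCell, h1, h2, Nat.mod_eq_of_lt hi]

-- B's row r (r < M) equals A's row written as the eight range-maps.
theorem alt_row (tt : List (List Int)) (i : Nat) (hi : i < tt.length) :
    (List.range (8 * tt.length)).map (fun c => begCell tt tt.length i c) =
    ((List.range tt.length).map (fun j => (tt.getD i []).getD j 0) ++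
     (List.range tt.length).map (fun j => (tt.getD j []).getD (tt.length - 1 - i) 0) ++
     (List.range tt.length).map (fun j => (tt.getD (tt.length - 1 - i) []).getD (tt.length - 1 - j) 0) ++
     (List.range tt.length).map (fun j => (tt.getD (tt.length - 1 - j) []).getD i 0)) ++
    ((List.range tt.length).map (fun j => (tt.getD i []).getD j 0) ++
     (List.range tt.length).map (fun j => (tt.getD j []).getD (tt.length - 1 - i) 0) ++
     (List.range tt.length).map (fun j => (tt.getD (tt.length - 1 - i) []).getD (tt.length - 1 - j) 0) ++
     (List.range tt.length).map (fun j => (tt.getD (tt.length - 1 - j) []).getD i 0)) := by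
  set M := tt.length with hM
  rw [map_range_mul]
  have hr8 : List.range 8 = [0, 1, 2, 3, 4, 5, 6, 7] := by decide
  rw [hr8]
  simp only [List.flatMap_cons, List.flatMap_nil, List.append_nil]
  have chunk : ∀ k : Nat,
      (List.range M).map (fun j => begCell tt M i (k * M + j)) =
      (List.range M).map (fun j =>
        (if k % 4 = 0 then (tt.getD i []).getD j 0
         else if k % 4 = 1 then (tt.getD j []).getD (M - 1 - i) 0
         else if k % 4 = 2 then (tt.getD (M - 1 - i) []).getD (M - 1 - j) 0
         else (tt.getD (M - 1 - j) []).getD i 0)) := by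
    intro k
    apply List.map_congr_left
    intro j hj
    simp only [List.mem_range] at hj
    exact begCell_block tt M i k j hi hj
  rw [chunk 0, chunk 1, chunk 2, chunk 3, chunk 4, chunk 5, chunk 6, chunk 7]
  norm_num [List.append_assoc]

-- B's cell only depends on the row index modulo M.
theorem begCell_row_mod (tt : List (List Int)) (M r c : Nat) :
    begCell tt M (M + r) c = begCell tt M r c := by
  simp [begCell, Nat.add_mod_left]

-- ===== VERDICT (by name: the statement is the Claim_ definition above) =====
theorem build_extended_grid_spec : Claim_equal_build_extended_grid := by
  intro tt _ hsq
  unfold Spec_build_extended_grid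
  have h90 : rotate_matrix tt 90 = pyZipStar tt.reverse := by norm_num [rotate_matrix]
  have h180 : rotate_matrix tt 180 = tt.reverse.map List.reverse := by norm_num [rotate_matrix]
  have h270 : rotate_matrix tt 270 = (pyZipStar tt).reverse := by norm_num [rotate_matrix]
  simp only [build_extended_grid, build_extended_grid_alt, h90, h180, h270]
  have h2 : 2 * tt.length = tt.length + tt.length := by ring
  rw [h2, map_range_add]
  have hb : (List.range tt.length).map
        (fun r => (List.range (8 * tt.length)).map (fun c => begCell tt tt.length (tt.length + r) c)) =
      (List.range tt.length).map
        (fun r => (List.range (8 * tt.length)).map (fun c => begCell tt tt.length r c)) := by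
    apply List.map_congr_left
    intro r _
    apply List.map_congr_left
    intro c _
    exact begCell_row_mod tt tt.length r c
  rw [hb]
  have key : (List.range tt.length).map (fun i =>
        tt.getD i [] ++ (pyZipStar tt).reverse.getD i [] ++
        (tt.reverse.map List.reverse).getD i [] ++ (pyZipStar tt.reverse).getD i [] ++
        tt.getD i [] ++ (pyZipStar tt).reverse.getD i [] ++
        (tt.reverse.map List.reverse).getD i [] ++ (pyZipStar tt.reverse).getD i []) =
      (List.range tt.length).map
        (fun r => (List.range (8 * tt.length)).map (fun c => begCell tt tt.length r c)) := by
    apply List.map_congr_left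
    intro i hi
    simp only [List.mem_range] at hi
    rw [row_eq tt hsq i hi, alt_row tt i hi]
  rw [key]
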